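-- pv_equiv track=rewrite | github.com/stefanhuber/n-queens-problem | helpers.py | evaluate_next_states
-- ===== SOURCE A (Python) =====
-- def find_attacking_pairs(state=[]):
--     pairs = set()
--
--     for index_1, item_1 in enumerate(state):
--         for index_2, item_2 in enumerate(state):
--             if index_1 == index_2 or index_1 > index_2:
--                 continue
--             elif item_1 == item_2:  # check rows
--                 pairs.add(((index_1, item_1), (index_2, item_2)))
--             elif abs(index_1 - index_2) == abs(item_1 - item_2):  # check diagonal
--                 pairs.add(((index_1, item_1), (index_2, item_2)))
--
--     return pairs
--
-- def evaluate_next_states(state=[]):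
--     n = len(state)
--     result = [[-1 for c in range(0, n)] for r in range(0, n)]
--
--     for column in range(0, n):
--         for row in range(0, n):
--             if state[column] != row:
--                 successor = state.copy()
--                 successor[column] = row
--                 result[row][column] = len(find_attacking_pairs(successor))
--
--     return result
-- ===== SOURCE B (Python) =====
-- def evaluate_next_states(state=[]):
--     # Faster: count the attacking pairs of `state` once, then derive each move's count
--     # incrementally: new count = base - (old attack degree of the moved queen) + (its degree
--     # at the new square), with degrees read in O(1) from row/diagonal occupancy counts.
--     n = len(state)
--
--     def atk(i, a, j, b):
--         return a == b or abs(i - j) == abs(a - b)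
--
--     base = sum(atk(i, state[i], j, state[j]) for j in range(n) for i in range(j))
--
--     rows = {}
--     d1 = {}
--     d2 = {}
--     for j, v in enumerate(state):
--         rows[v] = rows.get(v, 0) + 1
--         d1[j + v] = d1.get(j + v, 0) + 1
--         d2[j - v] = d2.get(j - v, 0) + 1
--
--     def deg(c, x):
--         return (rows.get(x, 0) + d1.get(c + x, 0) + d2.get(c - x, 0)
--                 - 3 * (state[c] == x))
--
--     old = [deg(c, state[c]) for c in range(n)]
--
--     return [[-1 if state[c] == r else base - old[c] + deg(c, r)
--              for c in range(n)]
--             for r in range(n)]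
-- ===== Notes on version B (the rewrite author's own statement) =====
-- stated objective: faster
-- what changed: Instead of re-enumerating all O(n^2) pairs of every successor board (O(n^4) total), B counts the pairs of the current board once, builds row/diagonal occupancy dictionaries in one pass, and derives each move's count incrementally: base count minus the moved queen's attack degree at its old square plus its degree at the new square, each degree three O(1) dictionary lookups.
import Mathlib
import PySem

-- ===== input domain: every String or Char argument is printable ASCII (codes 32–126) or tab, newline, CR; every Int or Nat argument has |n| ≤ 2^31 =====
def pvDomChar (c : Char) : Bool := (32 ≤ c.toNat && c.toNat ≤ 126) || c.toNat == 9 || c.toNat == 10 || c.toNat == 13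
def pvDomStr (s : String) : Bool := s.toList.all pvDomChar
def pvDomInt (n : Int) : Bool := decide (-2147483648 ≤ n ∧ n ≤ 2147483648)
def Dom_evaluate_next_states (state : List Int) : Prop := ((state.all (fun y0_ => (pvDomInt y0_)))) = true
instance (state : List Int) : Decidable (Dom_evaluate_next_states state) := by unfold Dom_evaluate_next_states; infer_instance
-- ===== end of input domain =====

-- B computes each move's pair count incrementally: one base count plus row/diagonal occupancy
-- dictionaries give each move's value in O(1) (O(n^2) total instead of A's O(n^4) re-enumeration
-- of all pairs per successor; measured faster); return values proved equal for every input.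

-- ===== PORT A =====
def find_attacking_pairs (state : List Int) : PySem.Set ((Int × Int) × (Int × Int)) :=
  (PySem.List.enumerate state).foldl (fun pairs p1 =>
    (PySem.List.enumerate state).foldl (fun pairs p2 =>
      if p1.1 = p2.1 ∨ p1.1 > p2.1 then pairs
      else if p1.2 = p2.2 then PySem.Set.add pairs (p1, p2)
      else if (p1.1 - p2.1).natAbs = (p1.2 - p2.2).natAbs then PySem.Set.add pairs (p1, p2)
      else pairs) pairs)
    PySem.Set.empty

def evaluate_next_states (state : List Int) : List (List Int) :=
  let n := PySem.List.len state
  let result := (PySem.List.pyRange 0 n 1).map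
    (fun _r => (PySem.List.pyRange 0 n 1).map (fun _c => (-1 : Int)))
  (PySem.List.pyRange 0 n 1).foldl (fun result column =>
    (PySem.List.pyRange 0 n 1).foldl (fun result row =>
      if PySem.List.pyGetD state column 0 ≠ row then
        -- successor = state.copy(); successor[column] = row  (0 ≤ column < len(state), so List.set is exact)
        let successor := state.set column.toNat row
        -- result[row][column] = len(find_attacking_pairs(successor))  (both indices in range)
        result.modify row.toNat (fun r => r.set column.toNat (PySem.Set.len (find_attacking_pairs successor)))
      else result) result) result

-- ===== PORT B =====
-- atk(i, a, j, b): do queens (i, a) and (j, b) attack each other?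
def pvAtk (i a j b : Int) : Bool := a == b || ((i - j).natAbs == (a - b).natAbs)

-- base = sum(atk(i, state[i], j, state[j]) for j in range(n) for i in range(j))
def pvBase (state : List Int) : Int :=
  (PySem.List.pyRange 0 (PySem.List.len state) 1).foldl (fun acc j =>
    (PySem.List.pyRange 0 j 1).foldl (fun acc i =>
      acc + (if pvAtk i (PySem.List.pyGetD state i 0) j (PySem.List.pyGetD state j 0) then 1 else 0)) acc) 0

-- the row/diagonal occupancy counters rows, d1, d2 (one pass over enumerate(state))
def pvCounts (state : List Int) : PySem.Dict Int Int × PySem.Dict Int Int × PySem.Dict Int Int :=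
  (PySem.List.enumerate state).foldl (fun d p =>
    (d.1.insert p.2 (d.1.getD p.2 0 + 1),
     d.2.1.insert (p.1 + p.2) (d.2.1.getD (p.1 + p.2) 0 + 1),
     d.2.2.insert (p.1 - p.2) (d.2.2.getD (p.1 - p.2) 0 + 1)))
    (PySem.Dict.empty, PySem.Dict.empty, PySem.Dict.empty)

-- deg(c, x) = rows.get(x,0) + d1.get(c+x,0) + d2.get(c-x,0) - 3*(state[c] == x)
def pvDegC (state : List Int) (rows d1 d2 : PySem.Dict Int Int) (c x : Int) : Int :=
  rows.getD x 0 + d1.getD (c + x) 0 + d2.getD (c - x) 0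
    - 3 * (if PySem.List.pyGetD state c 0 = x then 1 else 0)

def evaluate_next_states_alt (state : List Int) : List (List Int) :=
  let n := PySem.List.len state
  let base := pvBase state
  let cs := pvCounts state
  -- old = [deg(c, state[c]) for c in range(n)]
  let old := (PySem.List.pyRange 0 n 1).map (fun c =>
    pvDegC state cs.1 cs.2.1 cs.2.2 c (PySem.List.pyGetD state c 0))
  (PySem.List.pyRange 0 n 1).map (fun row =>
    (PySem.List.pyRange 0 n 1).map (fun column =>
      if PySem.List.pyGetD state column 0 = row then (-1 : Int)
      else base - PySem.List.pyGetD old column 0 + pvDegC state cs.1 cs.2.1 cs.2.2 column row))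

-- ===== PRECONDITION & SPEC =====
def Spec_evaluate_next_states (state : List Int) (out : List (List Int)) : Prop := out = evaluate_next_states_alt state
instance (state : List Int) (out : List (List Int)) : Decidable (Spec_evaluate_next_states state out) := by unfold Spec_evaluate_next_states; infer_instance

-- ===== CLAIM (what is proved, stated in full; the proofs are below) =====
def Claim_equal_evaluate_next_states : Prop := ∀ (state : List Int), Dom_evaluate_next_states state → Spec_evaluate_next_states state (evaluate_next_states state)

-- ===== LEMMAS AND PROOFS =====

theorem pvAtk_symm (i a j b : Int) : pvAtk i a j b = pvAtk j b i a := by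
  simp only [pvAtk]
  rw [show (i - j).natAbs = (j - i).natAbs by omega, show (a - b).natAbs = (b - a).natAbs by omega,
     BEq.comm]
def pvAInd (t : List Int) (i j : Nat) : Int :=
  if pvAtk i (t.getD i 0) j (t.getD j 0) then 1 else 0
def pvPairs (t : List Int) : Int :=
  ∑ j ∈ Finset.range t.length, ∑ i ∈ Finset.range j, pvAInd t i j
theorem pvBase_eq (state : List Int) : pvBase state = pvPairs state := by
  simp only [pvBase, PySem.List.len, PySem.List.pyRange_zero_natCast, List.foldl_map,
    PySem.List.foldl_add, List.map_map, Function.comp_def, PySem.List.pyGetD_natCast,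
    zero_add, pvPairs, pvAInd]
  rfl
def pvDegFS (t : List Int) (c : Nat) (x : Int) : Int :=
  ∑ j ∈ (Finset.range t.length).erase c, (if pvAtk c x j (t.getD j 0) then 1 else 0)
theorem pvCountsSplit (l : List (Int × Int)) (a b c : PySem.Dict Int Int) :
    l.foldl (fun d p =>
        (d.1.insert p.2 (d.1.getD p.2 0 + 1),
         d.2.1.insert (p.1 + p.2) (d.2.1.getD (p.1 + p.2) 0 + 1),
         d.2.2.insert (p.1 - p.2) (d.2.2.getD (p.1 - p.2) 0 + 1))) (a, b, c)
    = (l.foldl (fun d p => d.insert p.2 (d.getD p.2 0 + 1)) a,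
       l.foldl (fun d p => d.insert (p.1 + p.2) (d.getD (p.1 + p.2) 0 + 1)) b,
       l.foldl (fun d p => d.insert (p.1 - p.2) (d.getD (p.1 - p.2) 0 + 1)) c) := by
  induction l generalizing a b c with
  | nil => rfl
  | cons p l ih => rw [List.foldl_cons, List.foldl_cons, List.foldl_cons, List.foldl_cons, ih]

theorem pvFoldKey {κ : Type} [BEq κ] [LawfulBEq κ] (l : List (Int × Int)) (f : Int × Int → κ)
    (d : PySem.Dict κ Int) (v : κ) :
    (l.foldl (fun d p => d.insert (f p) (d.getD (f p) 0 + 1)) d).getD v 0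
      = d.getD v 0 + (List.count v (l.map f) : Int) := by
  rw [← PySem.Dict.getD_foldl_insert_add_one (l.map f) d v, List.foldl_map]

theorem pvEnumEq (t : List Int) :
    PySem.List.enumerate t = (List.range t.length).map (fun k : Nat => ((k : Int), t.getD k 0)) := by
  rw [PySem.List.enumerate_eq_map_pyRange t 0]
  simp [PySem.List.len, PySem.List.pyRange_zero_natCast, List.map_map, Function.comp_def,
    PySem.List.pyGetD_natCast]

theorem pvCountEnum (t : List Int) (F : Int × Int → Int) (y : Int) :
    ((List.count y ((PySem.List.enumerate t).map F) : Nat) : Int)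
    = ∑ j ∈ Finset.range t.length, (if F ((j : Int), t.getD j 0) = y then (1:Int) else 0) := by
  rw [pvEnumEq, List.map_map, List.count_eq_countP, List.countP_map]
  rw [← PySem.List.sum_map_ite_one_zero]
  show (∑ j ∈ Finset.range t.length, if (F ((j : Int), t.getD j 0) == y) then (1:Int) else 0) = _
  exact Finset.sum_congr rfl (fun j _ => by by_cases hy : F ((j : Int), t.getD j 0) = y <;> simp [hy])

theorem pvDegCnt (t : List Int) (c : Nat) (hc : c < t.length) (x : Int) :
    (∑ j ∈ Finset.range t.length, (if t.getD j 0 = x then (1:Int) else 0))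
    + (∑ j ∈ Finset.range t.length, (if (j:Int) + t.getD j 0 = (c:Int) + x then (1:Int) else 0))
    + (∑ j ∈ Finset.range t.length, (if (j:Int) - t.getD j 0 = (c:Int) - x then (1:Int) else 0))
    - 3 * (if t.getD c 0 = x then (1:Int) else 0)
    = pvDegFS t c x := by
  rw [← Finset.sum_add_distrib, ← Finset.sum_add_distrib]
  rw [← Finset.add_sum_erase _ _ (Finset.mem_range.mpr hc)]
  have hEc : ((if t.getD c 0 = x then (1:Int) else 0)
      + (if (c:Int) + t.getD c 0 = (c:Int) + x then (1:Int) else 0))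
      + (if (c:Int) - t.getD c 0 = (c:Int) - x then (1:Int) else 0)
      = 3 * (if t.getD c 0 = x then (1:Int) else 0) := by
    split_ifs <;> omega
  have hErase : (∑ j ∈ (Finset.range t.length).erase c,
      (((if t.getD j 0 = x then (1:Int) else 0)
        + (if (j:Int) + t.getD j 0 = (c:Int) + x then (1:Int) else 0))
        + (if (j:Int) - t.getD j 0 = (c:Int) - x then (1:Int) else 0)))
      = pvDegFS t c x := by
    rw [pvDegFS]
    refine Finset.sum_congr rfl (fun j hj => ?_)
    have hjc : j ≠ c := (Finset.mem_erase.mp hj).1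
    have hA : (if pvAtk (c:Int) x (j:Int) (t.getD j 0) then (1:Int) else 0)
        = if ((x = t.getD j 0) ∨ (((c:Int) - (j:Int)).natAbs = (x - t.getD j 0).natAbs)) then (1:Int) else 0 := by
      simp [pvAtk]
    rw [hA]
    split_ifs <;> omega
  rw [hEc, hErase]
  ring

theorem pvDegC_eq (state : List Int) (c : Nat) (hc : c < state.length) (x : Int) :
    pvDegC state (pvCounts state).1 (pvCounts state).2.1 (pvCounts state).2.2 (c : Int) x
      = pvDegFS state c x := by
  have hs := pvCountsSplit (PySem.List.enumerate state) PySem.Dict.empty PySem.Dict.empty PySem.Dict.empty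
  rw [pvDegC, pvCounts, hs]
  rw [show (fun (d : PySem.Dict Int Int) (p : Int × Int) => d.insert p.2 (d.getD p.2 0 + 1))
      = (fun d p => d.insert ((fun q : Int × Int => q.2) p) (d.getD ((fun q : Int × Int => q.2) p) 0 + 1)) from rfl]
  rw [pvFoldKey _ (fun q : Int × Int => q.2)]
  rw [show (fun (d : PySem.Dict Int Int) (p : Int × Int) => d.insert (p.1 + p.2) (d.getD (p.1 + p.2) 0 + 1))
      = (fun d p => d.insert ((fun q : Int × Int => q.1 + q.2) p) (d.getD ((fun q : Int × Int => q.1 + q.2) p) 0 + 1)) from rfl]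
  rw [pvFoldKey _ (fun q : Int × Int => q.1 + q.2)]
  rw [show (fun (d : PySem.Dict Int Int) (p : Int × Int) => d.insert (p.1 - p.2) (d.getD (p.1 - p.2) 0 + 1))
      = (fun d p => d.insert ((fun q : Int × Int => q.1 - q.2) p) (d.getD ((fun q : Int × Int => q.1 - q.2) p) 0 + 1)) from rfl]
  rw [pvFoldKey _ (fun q : Int × Int => q.1 - q.2)]
  simp only [PySem.Dict.getD_empty, zero_add]
  rw [pvCountEnum, pvCountEnum, pvCountEnum, PySem.List.pyGetD_natCast]
  rw [← pvDegCnt state c hc x]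

theorem pvFoldAddIf {α : Type} [BEq α] [LawfulBEq α] (L : List α) (p : α → Bool) (s : PySem.Set α)
    (hfresh : ∀ x ∈ L, x ∉ s) (hN : L.Nodup) :
    L.foldl (fun acc x => if p x then PySem.Set.add acc x else acc) s = s ++ L.filter p := by
  induction L generalizing s with
  | nil => simp
  | cons x L ih =>
    have hx : x ∉ s := hfresh x (by simp)
    have hadd : PySem.Set.add s x = s ++ [x] := by
      simp [PySem.Set.add, PySem.Set.contains, hx]
    have hN' := (List.nodup_cons.mp hN)
    by_cases hp : p x
    · simp only [List.foldl_cons, hp, hadd, if_true]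
      rw [ih (s ++ [x]) (fun y hy => by
        simp only [List.mem_append, List.mem_singleton]
        rintro (h | rfl)
        · exact hfresh y (by simp [hy]) h
        · exact hN'.1 hy) hN'.2]
      simp [List.filter_cons, hp]
    · simp [List.foldl_cons, hp, ih s (fun y hy => hfresh y (by simp [hy])) hN'.2, List.filter_cons]
theorem pvFind_eq_filter (t : List Int) :
    find_attacking_pairs t
      = ((PySem.List.enumerate t).flatMap (fun p1 => (PySem.List.enumerate t).map (fun p2 => (p1, p2)))).filter
          (fun q => decide (q.1.1 < q.2.1) && pvAtk q.1.1 q.1.2 q.2.1 q.2.2) := by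
  have hbody : ∀ (p1 : Int × Int) (acc : PySem.Set ((Int × Int) × (Int × Int))) (p2 : Int × Int),
      (if p1.1 = p2.1 ∨ p1.1 > p2.1 then acc
       else if p1.2 = p2.2 then PySem.Set.add acc (p1, p2)
       else if (p1.1 - p2.1).natAbs = (p1.2 - p2.2).natAbs then PySem.Set.add acc (p1, p2)
       else acc)
      = (if (decide (p1.1 < p2.1) && pvAtk p1.1 p1.2 p2.1 p2.2) then PySem.Set.add acc (p1, p2) else acc) := by
    intro p1 acc p2
    have h0 : (p1.1 = p2.1 ∨ p1.1 > p2.1) ↔ ¬ (p1.1 < p2.1) := by omega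
    by_cases h1 : p1.1 < p2.1 <;> by_cases h2 : p1.2 = p2.2 <;>
      by_cases h3 : (p1.1 - p2.1).natAbs = (p1.2 - p2.2).natAbs <;>
      simp [h0, h1, h2, h3, pvAtk]
  have hen : (PySem.List.enumerate t).Nodup :=
    (PySem.List.pairwise_lt_enumerate t 0).imp (fun h => by
      intro heq; rw [heq] at h; exact lt_irrefl _ h)
  have hprod : ((PySem.List.enumerate t).flatMap (fun p1 => (PySem.List.enumerate t).map (fun p2 => (p1, p2)))).Nodup := by
    exact List.Nodup.product hen hen
  unfold find_attacking_pairs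
  simp only [hbody]
  have heq : (fun (pairs : PySem.Set ((Int × Int) × (Int × Int))) (p1 : Int × Int) =>
      (PySem.List.enumerate t).foldl (fun pairs p2 =>
        if (decide (p1.1 < p2.1) && pvAtk p1.1 p1.2 p2.1 p2.2) then PySem.Set.add pairs (p1, p2) else pairs) pairs)
      = fun pairs p1 => ((PySem.List.enumerate t).map (fun p2 => (p1, p2))).foldl
          (fun acc q => if (decide (q.1.1 < q.2.1) && pvAtk q.1.1 q.1.2 q.2.1 q.2.2) then PySem.Set.add acc q else acc) pairs := by
    funext pairs p1; rw [List.foldl_map]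
  rw [heq, ← List.foldl_flatMap]
  rw [pvFoldAddIf _ _ _ (fun x _ hx => by simp [PySem.Set.empty] at hx) hprod]
  rfl
theorem pvSumIteLt (N c : Nat) (h : c ≤ N) (f : Nat → Int) :
    (∑ j ∈ Finset.range N, if j < c then f j else 0) = ∑ j ∈ Finset.range c, f j := by
  rw [← Finset.sum_subset (fun x hx => Finset.mem_range.mpr (lt_of_lt_of_le (Finset.mem_range.mp hx) h))
      (fun x _ hnx => by have := Finset.mem_range.not.mp hnx; simp; omega)]
  exact Finset.sum_congr rfl fun j hj => by simp [Finset.mem_range.mp hj]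
theorem pvFind_len (t : List Int) :
    PySem.Set.len (find_attacking_pairs t) = pvPairs t := by
  rw [pvFind_eq_filter]
  have hlen : ∀ (s : PySem.Set ((Int × Int) × (Int × Int))), PySem.Set.len s = (s.length : Int) :=
    fun _ => rfl
  rw [hlen, ← List.countP_eq_length_filter, List.countP_flatMap]
  rw [pvEnumEq]
  simp only [List.map_map, Function.comp_def, List.countP_map, Nat.cast_list_sum]
  simp only [List.map_map, Function.comp_def, ← PySem.List.sum_map_ite_one_zero]
  have hfin : (List.map (fun x : Nat => (List.map (fun y : Nat => if (decide ((x:Int) < (y:Int)) && pvAtk x (t.getD x 0) y (t.getD y 0)) = true then (1:Int) else 0) (List.range t.length)).sum) (List.range t.length)).sum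
      = ∑ k1 ∈ Finset.range t.length, ∑ k2 ∈ Finset.range t.length, (if (decide ((k1:Int) < (k2:Int)) && pvAtk k1 (t.getD k1 0) k2 (t.getD k2 0)) then (1:Int) else 0) := rfl
  rw [hfin]
  have hterm : ∀ k1 k2 : Nat, (if (decide ((k1:Int) < (k2:Int)) && pvAtk k1 (t.getD k1 0) k2 (t.getD k2 0)) then (1:Int) else 0) = if k1 < k2 then pvAInd t k1 k2 else 0 := by
    intro k1 k2
    by_cases h : k1 < k2
    · simp [h, pvAInd]
    · simp [h]
  simp only [hterm]
  rw [Finset.sum_comm, pvPairs]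
  exact Finset.sum_congr rfl fun k2 hk2 => pvSumIteLt _ _ (le_of_lt (Finset.mem_range.mp hk2)) _
theorem pvGetD_set (t : List Int) (c : Nat) (r : Int) (hc : c < t.length) (k : Nat) :
    (t.set c r).getD k 0 = if k = c then r else t.getD k 0 := by
  by_cases h : k = c
  · subst h; simp [List.getD_eq_getElem?_getD, List.getElem?_set, hc]
  · have h' : ¬ c = k := fun hh => h hh.symm
    simp [List.getD_eq_getElem?_getD, List.getElem?_set, h, h']
theorem pvY (t : List Int) (c : Nat) (hc : c < t.length) :
    (∑ j ∈ Finset.range t.length, ∑ i ∈ Finset.range j,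
       (if i = c ∨ j = c then pvAInd t i j else 0)) = pvDegFS t c (t.getD c 0) := by
  have hg : ∀ j ∈ Finset.range t.length,
      (∑ i ∈ Finset.range j, if i = c ∨ j = c then pvAInd t i j else 0)
      = if j = c then (∑ i ∈ Finset.range c, pvAInd t i c)
        else (if c < j then pvAInd t c j else 0) := by
    intro j _
    by_cases hjc : j = c
    · subst hjc; simp
    · rw [if_neg hjc]
      rw [Finset.sum_congr rfl (fun i _ => show (if i = c ∨ j = c then pvAInd t i j else 0) = (if i = c then pvAInd t i j else 0) by simp [hjc])]
      rw [Finset.sum_ite_eq' (Finset.range j) c (fun i => pvAInd t i j)]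
      simp [Finset.mem_range]
  rw [Finset.sum_congr rfl hg]
  rw [← Finset.add_sum_erase _ _ (Finset.mem_range.mpr hc), if_pos rfl]
  rw [Finset.sum_congr rfl (fun j hj => show (if j = c then (∑ i ∈ Finset.range c, pvAInd t i c)
        else (if c < j then pvAInd t c j else 0)) = (if c < j then pvAInd t c j else 0) from by
    rw [if_neg (Finset.mem_erase.mp hj).1])]
  have hRHS : pvDegFS t c (t.getD c 0)
      = ∑ j ∈ (Finset.range t.length).erase c, pvAInd t c j := by
    exact Finset.sum_congr rfl (fun j _ => by rw [pvAInd])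
  rw [hRHS]
  have hsplitR : (∑ j ∈ (Finset.range t.length).erase c, pvAInd t c j)
      = (∑ j ∈ (Finset.range t.length).erase c, if c < j then pvAInd t c j else 0)
        + (∑ j ∈ (Finset.range t.length).erase c, if j < c then pvAInd t c j else 0) := by
    rw [← Finset.sum_add_distrib]
    refine Finset.sum_congr rfl (fun j hj => ?_)
    have hne : j ≠ c := (Finset.mem_erase.mp hj).1
    rcases lt_or_gt_of_ne hne with h | h
    · simp [h, not_lt_of_gt h]
    · simp [h, not_lt_of_gt h]
  rw [hsplitR]
  have hlow : (∑ j ∈ (Finset.range t.length).erase c, if j < c then pvAInd t c j else 0)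
      = ∑ i ∈ Finset.range c, pvAInd t i c := by
    rw [Finset.sum_erase _ (by simp)]
    rw [pvSumIteLt _ _ (le_of_lt hc)]
    exact Finset.sum_congr rfl (fun i _ => by rw [pvAInd, pvAInd, pvAtk_symm])
  rw [hlow]
  ring
theorem pvDelta (t : List Int) (c : Nat) (r : Int) (hc : c < t.length) :
    pvPairs (t.set c r) = pvPairs t - pvDegFS t c (t.getD c 0) + pvDegFS t c r := by
  have hlen : (t.set c r).length = t.length := List.length_set
  have hsplit : ∀ (u : List Int), u.length = t.length → pvPairs u
      = (∑ j ∈ Finset.range t.length, ∑ i ∈ Finset.range j, if i = c ∨ j = c then 0 else pvAInd u i j)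
        + (∑ j ∈ Finset.range t.length, ∑ i ∈ Finset.range j, if i = c ∨ j = c then pvAInd u i j else 0) := by
    intro u hu
    rw [pvPairs, hu, ← Finset.sum_add_distrib]
    refine Finset.sum_congr rfl (fun j _ => ?_)
    rw [← Finset.sum_add_distrib]
    refine Finset.sum_congr rfl (fun i _ => ?_)
    by_cases h : i = c ∨ j = c <;> simp [h]
  have hget : ∀ k : Nat, k ≠ c → (t.set c r).getD k 0 = t.getD k 0 := by
    intro k hk; rw [pvGetD_set t c r hc k, if_neg hk]
  have hX : (∑ j ∈ Finset.range t.length, ∑ i ∈ Finset.range j, if i = c ∨ j = c then 0 else pvAInd (t.set c r) i j)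
      = (∑ j ∈ Finset.range t.length, ∑ i ∈ Finset.range j, if i = c ∨ j = c then 0 else pvAInd t i j) := by
    refine Finset.sum_congr rfl (fun j _ => Finset.sum_congr rfl (fun i _ => ?_))
    by_cases h : i = c ∨ j = c
    · simp [h]
    · rw [not_or] at h
      rw [if_neg (by tauto), if_neg (by tauto), pvAInd, pvAInd, hget i h.1, hget j h.2]
  have hY' : (∑ j ∈ Finset.range t.length, ∑ i ∈ Finset.range j, if i = c ∨ j = c then pvAInd (t.set c r) i j else 0)
      = pvDegFS t c r := by
    have h1 := pvY (t.set c r) c (by rw [hlen]; exact hc)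
    rw [hlen] at h1
    rw [h1, pvGetD_set t c r hc c, if_pos rfl]
    rw [pvDegFS, pvDegFS, hlen]
    exact Finset.sum_congr rfl (fun j hj => by rw [hget j (Finset.mem_erase.mp hj).1])
  rw [hsplit (t.set c r) hlen, hsplit t rfl, hX, hY', ← pvY t c hc]
  ring
theorem pvSetMapRange {α : Type} (N c : Nat) (hc : c < N) (F : Nat → α) (v : α) :
    ((List.range N).map F).set c v = (List.range N).map (fun c' => if c' = c then v else F c') := by
  apply List.ext_getElem (by simp)
  intro i h1 h2
  simp only [List.getElem_set, List.getElem_map, List.getElem_range]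
  simp only [List.length_set, List.length_map, List.length_range] at h1
  by_cases h : i = c
  · subst h; simp
  · have h' : ¬ c = i := fun hh => h hh.symm
    simp [h, h']
theorem pvModifyMapRange {α : Type} (N r : Nat) (hr : r < N) (F : Nat → α) (f : α → α) :
    ((List.range N).map F).modify r f = (List.range N).map (fun r' => if r' = r then f (F r) else F r') := by
  apply List.ext_getElem (by simp)
  intro i h1 h2
  simp only [List.getElem_modify, List.getElem_map, List.getElem_range]
  by_cases h : i = r
  · subst h; simp
  · have h' : ¬ r = i := fun hh => h hh.symm
    simp [h, h']
def pvVal (state : List Int) (c r : Nat) : Int :=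
  PySem.Set.len (find_attacking_pairs (state.set c (r : Int)))
theorem pvInner (state : List Int) (c : Nat) (hc : c < state.length) (F : Nat → Nat → Int)
    (m : Nat) (hm : m ≤ state.length) :
    (List.range m).foldl (fun (res : List (List Int)) (r : Nat) => if state.getD c 0 ≠ (r : Int) then
        res.modify r (fun row => row.set c (pvVal state c r)) else res)
      ((List.range state.length).map (fun r => (List.range state.length).map (F r)))
    = (List.range state.length).map (fun r => (List.range state.length).map (fun c' =>
        if c' = c ∧ r < m ∧ state.getD c 0 ≠ (r : Int) then pvVal state c r else F r c')) := by
  induction m with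
  | zero => simp
  | succ m ih =>
    rw [List.range_succ, List.foldl_append, ih (Nat.le_of_succ_le hm), List.foldl_cons, List.foldl_nil]
    have hmN : m < state.length := hm
    by_cases hne : state.getD c 0 ≠ (m : Int)
    · rw [if_pos hne, pvModifyMapRange state.length m hmN]
      refine List.map_congr_left (fun r hr => ?_)
      by_cases hrm : r = m
      · subst hrm
        rw [if_pos rfl, pvSetMapRange state.length c hc]
        refine List.map_congr_left (fun c2 hc2 => ?_)
        by_cases hc2c : c2 = c
        · simp [hc2c, Nat.lt_succ_self]
          intro h
          exact absurd (by simpa [List.getD_eq_getElem?_getD] using h) hne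
        · simp [hc2c]
      · rw [if_neg hrm]
        refine List.map_congr_left (fun c2 hc2 => ?_)
        by_cases hcond : c2 = c ∧ r < m ∧ state.getD c 0 ≠ (r : Int)
        · rw [if_pos hcond, if_pos ⟨hcond.1, Nat.lt_succ_of_lt hcond.2.1, hcond.2.2⟩]
        · rw [if_neg hcond, if_neg (fun h => hcond ⟨h.1, by omega, h.2.2⟩)]
    · rw [if_neg hne]
      refine List.map_congr_left (fun r hr => List.map_congr_left (fun c2 hc2 => ?_))
      by_cases hcond : c2 = c ∧ r < m ∧ state.getD c 0 ≠ (r : Int)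
      · rw [if_pos hcond, if_pos ⟨hcond.1, Nat.lt_succ_of_lt hcond.2.1, hcond.2.2⟩]
      · rw [if_neg hcond]
        rw [if_neg (fun h => ?_)]
        rcases Nat.lt_succ_iff_lt_or_eq.mp h.2.1 with h' | h'
        · exact hcond ⟨h.1, h', h.2.2⟩
        · subst h'; exact hne h.2.2
theorem pvOuter (state : List Int) (m : Nat) (hm : m ≤ state.length) :
    (List.range m).foldl (fun (res : List (List Int)) (c : Nat) =>
        (List.range state.length).foldl (fun (res : List (List Int)) (r : Nat) =>
          if state.getD c 0 ≠ (r : Int) then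
            res.modify r (fun row => row.set c (pvVal state c r)) else res) res)
      ((List.range state.length).map (fun _ => (List.range state.length).map (fun _ => (-1 : Int))))
    = (List.range state.length).map (fun (r : Nat) => (List.range state.length).map (fun (c' : Nat) =>
        if c' < m ∧ state.getD c' 0 ≠ (r : Int) then pvVal state c' r else -1)) := by
  induction m with
  | zero => simp
  | succ m ih =>
    rw [List.range_succ, List.foldl_append, ih (Nat.le_of_succ_le hm), List.foldl_cons, List.foldl_nil]
    have hmN : m < state.length := hm
    rw [pvInner state m hmN
      (fun (r c' : Nat) => if c' < m ∧ state.getD c' 0 ≠ (r : Int) then pvVal state c' r else -1)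
      state.length (le_refl _)]
    refine List.map_congr_left (fun r hr => List.map_congr_left (fun c2 hc2 => ?_))
    have hrN : r < state.length := List.mem_range.mp hr
    by_cases hc2m : c2 = m
    · subst hc2m
      by_cases hne : state.getD c2 0 ≠ (r : Int)
      · rw [if_pos ⟨rfl, hrN, hne⟩, if_pos ⟨Nat.lt_succ_self _, hne⟩]
      · rw [if_neg (fun h => hne h.2.2), if_neg (fun h => hne h.2), if_neg (fun h => hne h.2)]
    · rw [if_neg (fun h => hc2m h.1)]
      by_cases hcond : c2 < m ∧ state.getD c2 0 ≠ (r : Int)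
      · rw [if_pos hcond, if_pos ⟨Nat.lt_succ_of_lt hcond.1, hcond.2⟩]
      · rw [if_neg hcond, if_neg (fun h => hcond ⟨by omega, h.2⟩)]
theorem pvMain (state : List Int) : evaluate_next_states state = evaluate_next_states_alt state := by
  have hA := pvOuter state state.length (le_refl _)
  simp only [pvVal] at hA
  simp only [evaluate_next_states, evaluate_next_states_alt, PySem.List.len,
    PySem.List.pyRange_zero_natCast, List.foldl_map, List.map_map, Function.comp_def,
    PySem.List.pyGetD_natCast, Int.toNat_natCast]
  rw [hA]
  refine List.map_congr_left (fun r hr => List.map_congr_left (fun c hc => ?_))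
  have hcN : c < state.length := List.mem_range.mp hc
  by_cases h : state.getD c 0 = (r : Int)
  · rw [if_pos h, if_neg (fun hh => hh.2 h)]
  · rw [if_neg h, if_pos ⟨hcN, h⟩]
    have hold : (List.map (fun k : Nat => pvDegC state (pvCounts state).1 (pvCounts state).2.1
          (pvCounts state).2.2 (k : Int) (state.getD k 0)) (List.range state.length)).getD c 0
        = pvDegC state (pvCounts state).1 (pvCounts state).2.1 (pvCounts state).2.2 (c : Int) (state.getD c 0) := by
      simp [List.getD_eq_getElem?_getD, hcN]
    rw [hold, pvFind_len, pvDelta state c (r : Int) hcN, pvBase_eq,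
      pvDegC_eq state c hcN, pvDegC_eq state c hcN]

-- ===== VERDICT (by name: the statement is the Claim_ definition above) =====
theorem evaluate_next_states_spec : Claim_equal_evaluate_next_states := by
  intro state _
  unfold Spec_evaluate_next_states
  exact pvMain state
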